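-- pv_equiv track=rewrite | github.com/k-papadakis/advent-of-code | 2024/day_02/solution.py | is_safe_asc
-- ===== SOURCE A (Python) =====
-- def is_safe_asc(report: list[int], tolerate: bool) -> bool:
--     for i in range(1, len(report)):
--         if not 1 <= report[i] - report[i - 1] <= 3:
--             return tolerate and (
--                 is_safe_asc(
--                     report[i - 1 : i] + report[i + 1 :],
--                     tolerate=False,
--                 )
--                 or is_safe_asc(
--                     report[i - 2 : i - 1] + report[i:],
--                     tolerate=False,
--                 )
--             )
--     return True
-- ===== SOURCE B (Python) =====
-- def is_safe_asc(report: list[int], tolerate: bool) -> bool: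
--     def ok(seq):
--         return all(1 <= b - a <= 3 for a, b in zip(seq, seq[1:]))
--     if ok(report):
--         return True
--     if not tolerate:
--         return False
--     return any(ok(report[:k] + report[k + 1:]) for k in range(len(report)))
-- ===== Notes on version B (the rewrite author's own statement) =====
-- stated objective: simpler
-- what changed: A's single left-to-right pass that recurses on two spliced suffixes at the first violation is replaced by a plain adjacency check `ok` plus a brute-force 'safe after deleting one index' scan over all indices.
import Mathlib
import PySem

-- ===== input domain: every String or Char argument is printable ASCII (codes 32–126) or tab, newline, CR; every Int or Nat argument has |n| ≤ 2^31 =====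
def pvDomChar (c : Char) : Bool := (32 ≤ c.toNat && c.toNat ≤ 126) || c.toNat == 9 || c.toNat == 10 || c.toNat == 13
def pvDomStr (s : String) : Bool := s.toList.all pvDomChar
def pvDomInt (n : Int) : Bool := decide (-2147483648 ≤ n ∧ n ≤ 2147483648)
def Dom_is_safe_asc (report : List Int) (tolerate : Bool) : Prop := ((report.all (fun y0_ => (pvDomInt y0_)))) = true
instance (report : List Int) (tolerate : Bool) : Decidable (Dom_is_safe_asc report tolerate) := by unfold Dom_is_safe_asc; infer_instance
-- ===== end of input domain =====

-- B replaces A's single pass with first-violation recursion by the plain brute-force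
-- check "safe as is, or safe after deleting one index" (simpler, quadratic vs linear).

-- ===== PORT A =====
-- the `for i in range(1, len(report))` loop with early return; recursive calls pass
-- tolerate=False, so Python's short-circuit `tolerate and (...)` is the `if tolerate` guard.
def isAscLoopA (report : List Int) (tolerate : Bool) (i : Nat) : Bool :=
  if h : i < report.length then
    have h' : i - 1 < report.length := Nat.lt_of_le_of_lt (Nat.sub_le i 1) h
    if 1 ≤ report[i] - report[i-1] ∧ report[i] - report[i-1] ≤ 3 then
      isAscLoopA report tolerate (i+1)
    else if tolerate then
      isAscLoopA (PySem.List.slice report (some ((i:Int)-1)) (some (i:Int)) ++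
                  PySem.List.slice report (some ((i:Int)+1)) none) false 1
      || isAscLoopA (PySem.List.slice report (some ((i:Int)-2)) (some ((i:Int)-1)) ++
                     PySem.List.slice report (some (i:Int)) none) false 1
    else false
  else true
termination_by ((if tolerate then 1 else 0 : Nat), report.length - i)
decreasing_by
  · exact Prod.Lex.right _ (by omega)
  · exact Prod.Lex.left _ _ (by simp_all)
  · exact Prod.Lex.left _ _ (by simp_all)

def is_safe_asc (report : List Int) (tolerate : Bool) : Bool :=
  isAscLoopA report tolerate 1

-- ===== PORT B =====
-- ok(seq) = all(1 <= b - a <= 3 for a, b in zip(seq, seq[1:]))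
def okAlt (seq : List Int) : Bool :=
  (seq.zip (seq.drop 1)).all fun p => decide (1 ≤ p.2 - p.1) && decide (p.2 - p.1 ≤ 3)

def is_safe_asc_alt (report : List Int) (tolerate : Bool) : Bool :=
  if okAlt report then true
  else if !tolerate then false
  else (List.range report.length).any fun k => okAlt (report.take k ++ report.drop (k+1))

-- ===== PRECONDITION & SPEC =====
def Spec_is_safe_asc (report : List Int) (tolerate : Bool) (out : Bool) : Prop := out = is_safe_asc_alt report tolerate
instance (report : List Int) (tolerate : Bool) (out : Bool) : Decidable (Spec_is_safe_asc report tolerate out) := by unfold Spec_is_safe_asc; infer_instance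

-- ===== CLAIM (what is proved, stated in full; the proofs are below) =====
def Claim_equal_is_safe_asc : Prop := ∀ (report : List Int) (tolerate : Bool), Dom_is_safe_asc report tolerate → Spec_is_safe_asc report tolerate (is_safe_asc report tolerate)

-- ===== LEMMAS AND PROOFS =====

-- adjacent pair at positions m, m+1 is a safe ascending step
def GoodAt (r : List Int) (m : Nat) : Prop :=
  1 ≤ r.getD (m+1) 0 - r.getD m 0 ∧ r.getD (m+1) 0 - r.getD m 0 ≤ 3

lemma okAlt_cons₂ (a b : Int) (t : List Int) :
    okAlt (a :: b :: t) = ((decide (1 ≤ b - a) && decide (b - a ≤ 3)) && okAlt (b :: t)) := by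
  simp [okAlt, Bool.and_assoc]

lemma ok_iff (s : List Int) :
    okAlt s = true ↔ ∀ m, m + 1 < s.length → GoodAt s m := by
  match s with
  | [] => simp [okAlt]
  | [a] => simp [okAlt]
  | a :: b :: t =>
    rw [okAlt_cons₂, Bool.and_eq_true, ok_iff (b :: t)]
    constructor
    · rintro ⟨hab, htail⟩ m hm
      cases m with
      | zero =>
        simp only [Bool.and_eq_true, decide_eq_true_eq] at hab
        simpa [GoodAt] using hab
      | succ m => simpa [GoodAt] using htail m (by simpa using hm)
    · intro h
      refine ⟨?_, fun m hm => ?_⟩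
      · have := h 0 (by simp)
        simp only [GoodAt, List.getD_cons_succ, List.getD_cons_zero] at this
        simp [this.1, this.2]
      · simpa [GoodAt] using h (m+1) (by simpa using hm)

lemma okAlt_short (s : List Int) (h : s.length ≤ 1) : okAlt s = true := by
  match s with
  | [] => simp [okAlt]
  | [a] => simp [okAlt]
  | a :: b :: t => simp at h

lemma getD_drop (r : List Int) (j t : Nat) : (r.drop j).getD t 0 = r.getD (j+t) 0 := by
  simp [List.getD_eq_getElem?_getD, List.getElem?_drop]

lemma getD_remove (r : List Int) (k t : Nat) (hk : k < r.length) :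
    (r.take k ++ r.drop (k+1)).getD t 0 = if t < k then r.getD t 0 else r.getD (t+1) 0 := by
  by_cases h : t < k
  · rw [if_pos h]
    rw [List.getD_eq_getElem?_getD, List.getElem?_append_left (by simp; omega)]
    simp [h, List.getD_eq_getElem?_getD]
  · rw [if_neg h]
    rw [List.getD_eq_getElem?_getD, List.getElem?_append_right (by simp; omega)]
    simp only [List.length_take, List.getElem?_drop]
    rw [show k + 1 + (t - min k r.length) = t + 1 by omega]
    simp [List.getD_eq_getElem?_getD]

lemma length_remove (r : List Int) (k : Nat) (hk : k < r.length) :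
    (r.take k ++ r.drop (k+1)).length = r.length - 1 := by
  simp; omega

lemma ok_drop_iff (r : List Int) (j : Nat) :
    okAlt (r.drop j) = true ↔ ∀ m, j ≤ m → m + 1 < r.length → GoodAt r m := by
  rw [ok_iff]
  constructor
  · intro h m hjm hm
    have := h (m - j) (by simp only [List.length_drop]; omega)
    simp only [GoodAt, getD_drop] at this
    rw [show j + (m-j+1) = m + 1 by omega, show j + (m-j) = m by omega] at this
    exact this
  · intro h m hm
    simp only [List.length_drop] at hm
    simp only [GoodAt, getD_drop]
    have := h (j+m) (by omega) (by omega)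
    simp only [GoodAt] at this
    rw [show j + (m+1) = j + m + 1 by omega]
    exact this

lemma ok_cons_drop_iff (r : List Int) (x : Int) (j : Nat) :
    okAlt (x :: r.drop j) = true ↔
      ((j < r.length → 1 ≤ r.getD j 0 - x ∧ r.getD j 0 - x ≤ 3) ∧
       ∀ m, j ≤ m → m + 1 < r.length → GoodAt r m) := by
  by_cases hj : j < r.length
  · have hd : r.drop j = r.getD j 0 :: r.drop (j+1) := by
      rw [List.drop_eq_getElem_cons hj, List.getD_eq_getElem?_getD, List.getElem?_eq_getElem hj]
      rfl
    rw [hd, okAlt_cons₂, Bool.and_eq_true, ← hd, ok_drop_iff]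
    constructor
    · rintro ⟨hx, ht⟩
      exact ⟨fun _ => by simpa using hx, ht⟩
    · rintro ⟨hx, ht⟩
      refine ⟨?_, ht⟩
      have h1 := (hx hj).1
      have h2 := (hx hj).2
      rw [List.getD_eq_getElem?_getD] at h1 h2
      simp only [Bool.and_eq_true, decide_eq_true_eq]
      omega
  · have hd : r.drop j = [] := by rw [List.drop_eq_nil_iff]; omega
    rw [hd]
    simp only [okAlt_short [x] (by simp), true_iff]
    exact ⟨fun h => absurd h hj, fun m hjm hm => by omega⟩

lemma ok_remove_iff (r : List Int) (k : Nat) (hk : k < r.length) :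
    okAlt (r.take k ++ r.drop (k+1)) = true ↔
      ∀ m, m + 1 < r.length - 1 →
        (1 ≤ (if m+1 < k then r.getD (m+1) 0 else r.getD (m+2) 0) -
               (if m < k then r.getD m 0 else r.getD (m+1) 0) ∧
         (if m+1 < k then r.getD (m+1) 0 else r.getD (m+2) 0) -
               (if m < k then r.getD m 0 else r.getD (m+1) 0) ≤ 3) := by
  rw [ok_iff]
  simp only [length_remove r k hk, GoodAt, getD_remove r k _ hk]

lemma cand1_eq (r : List Int) (i : Nat) (h1 : 1 ≤ i) (hi : i < r.length) :
    PySem.List.slice r (some ((i:Int)-1)) (some (i:Int)) ++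
      PySem.List.slice r (some ((i:Int)+1)) none
      = r[i-1]'(by omega) :: r.drop (i+1) := by
  have e1 : (i:Int) - 1 = ((i-1 : Nat) : Int) := by omega
  have e2 : (i:Int) + 1 = ((i+1 : Nat) : Int) := by omega
  rw [e1, e2, PySem.List.slice_natCast, PySem.List.slice_from_natCast]
  rw [List.drop_eq_getElem_cons (show i - 1 < r.length by omega)]
  rw [show i - 1 + 1 = i by omega, show i - (i-1) = 1 by omega]
  simp

lemma slice_neg_one_zero (r : List Int) :
    PySem.List.slice r (some (-1)) (some 0) = [] := by
  apply List.eq_nil_of_length_eq_zero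
  rw [PySem.List.length_slice]
  simp

lemma cand2_eq_one (r : List Int) :
    PySem.List.slice r (some (((1:Nat):Int)-2)) (some (((1:Nat):Int)-1)) ++
      PySem.List.slice r (some ((1:Nat):Int)) none = r.drop 1 := by
  rw [show ((1:Nat):Int)-2 = -1 by norm_num, show ((1:Nat):Int)-1 = 0 by norm_num]
  cases r with
  | nil => simp [PySem.List.slice]
  | cons a t =>
    rw [slice_neg_one_zero _, PySem.List.slice_from_natCast]
    simp

lemma cand2_eq (r : List Int) (i : Nat) (h2 : 2 ≤ i) (hi : i < r.length) :
    PySem.List.slice r (some ((i:Int)-2)) (some ((i:Int)-1)) ++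
      PySem.List.slice r (some (i:Int)) none
      = r[i-2]'(by omega) :: r.drop i := by
  have e1 : (i:Int) - 2 = ((i-2 : Nat) : Int) := by omega
  have e2 : (i:Int) - 1 = ((i-1 : Nat) : Int) := by omega
  rw [e1, e2, PySem.List.slice_natCast, PySem.List.slice_from_natCast]
  rw [List.drop_eq_getElem_cons (show i - 2 < r.length by omega)]
  rw [show i - 2 + 1 = i - 1 by omega, show i - 1 - (i-2) = 1 by omega]
  simp

lemma getElem_eq_getD (r : List Int) (j : Nat) (hj : j < r.length) :
    r[j] = r.getD j 0 := by
  rw [List.getD_eq_getElem?_getD, List.getElem?_eq_getElem hj]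
  rfl

lemma loopA_false (r : List Int) (i : Nat) (h1 : 1 ≤ i) :
    isAscLoopA r false i = okAlt (r.drop (i-1)) := by
  rw [isAscLoopA]
  by_cases h : i < r.length
  · rw [dif_pos h]
    have hd1 : r.drop (i-1) = r[i-1]'(by omega) :: r.drop i := by
      rw [List.drop_eq_getElem_cons (by omega)]
      rw [show i - 1 + 1 = i by omega]
    have hd2 : r.drop i = r[i] :: r.drop (i+1) := List.drop_eq_getElem_cons h
    rw [hd1, hd2, okAlt_cons₂]
    by_cases hg : 1 ≤ r[i] - r[i-1] ∧ r[i] - r[i-1] ≤ 3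
    · rw [if_pos hg]
      rw [loopA_false r (i+1) (by omega), show i + 1 - 1 = i by omega, hd2]
      simp [hg.1, hg.2]
    · rw [if_neg hg]
      rcases not_and_or.mp hg with hb | hb <;> simp [hb]
  · rw [dif_neg h]
    exact (okAlt_short _ (by simp; omega)).symm
termination_by r.length - i
decreasing_by omega

lemma core (r : List Int) (i : Nat) (h1 : 1 ≤ i) (hi : i < r.length)
    (hpre : ∀ m, m + 1 < i → GoodAt r m)
    (hbad : ¬ GoodAt r (i-1)) :
    ((List.range r.length).any fun k => okAlt (r.take k ++ r.drop (k+1)))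
      = (okAlt (r.getD (i-1) 0 :: r.drop (i+1)) ||
         okAlt (if i = 1 then r.drop 1 else r.getD (i-2) 0 :: r.drop i)) := by
  rw [Bool.eq_iff_iff]
  simp only [List.any_eq_true, List.mem_range, Bool.or_eq_true]
  constructor
  · rintro ⟨k, hk, hok⟩
    rw [ok_remove_iff r k hk] at hok
    by_cases hki : k + 1 < i
    · exfalso
      apply hbad
      have := hok (i-2) (by omega)
      rw [if_neg (by omega), if_neg (by omega)] at this
      unfold GoodAt
      rw [show i - 1 + 1 = i by omega]
      rw [show i-2+1 = i-1 by omega, show i-2+2 = i by omega] at this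
      exact this
    by_cases hki2 : i < k
    · exfalso
      apply hbad
      have := hok (i-1) (by omega)
      rw [if_pos (by omega), if_pos (by omega)] at this
      unfold GoodAt
      rw [show i-1+1 = i by omega]
      rw [show i-1+1 = i by omega] at this
      exact this
    by_cases hk2 : k = i
    · left
      rw [ok_cons_drop_iff]
      constructor
      · intro hn1
        have := hok (i-1) (by omega)
        rw [if_neg (by omega), if_pos (by omega)] at this
        rw [show i-1+2 = i+1 by omega] at this
        exact this
      · intro m him hm
        have := hok (m-1) (by omega)
        rw [if_neg (by omega), if_neg (by omega)] at this
        unfold GoodAt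
        rw [show m-1+1 = m by omega, show m-1+2 = m+1 by omega] at this
        exact this
    · have hk3 : k = i - 1 := by omega
      right
      by_cases hone : i = 1
      · subst hone
        rw [if_pos rfl, ok_drop_iff]
        intro m h1m hm
        have := hok (m-1) (by omega)
        rw [if_neg (by omega), if_neg (by omega)] at this
        unfold GoodAt
        rw [show m-1+1 = m by omega, show m-1+2 = m+1 by omega] at this
        exact this
      · rw [if_neg hone, ok_cons_drop_iff]
        constructor
        · intro _
          have := hok (i-2) (by omega)
          rw [if_neg (by omega), if_pos (by omega)] at this
          rw [show i-2+2 = i by omega] at this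
          exact this
        · intro m him hm
          have := hok (m-1) (by omega)
          rw [if_neg (by omega), if_neg (by omega)] at this
          unfold GoodAt
          rw [show m-1+1 = m by omega, show m-1+2 = m+1 by omega] at this
          exact this
  · rintro (hok | hok)
    · refine ⟨i, hi, ?_⟩
      rw [ok_remove_iff r i hi]
      rw [ok_cons_drop_iff] at hok
      obtain ⟨hjunc, htail⟩ := hok
      intro m hm
      by_cases hmi : m + 1 < i
      · rw [if_pos (by omega), if_pos (by omega)]
        exact hpre m hmi
      by_cases hmi2 : m + 1 = i
      · rw [if_neg (by omega), if_pos (by omega)]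
        have := hjunc (by omega)
        rw [show i + 1 = m + 2 by omega, show i - 1 = m by omega] at this
        exact this
      · rw [if_neg (by omega), if_neg (by omega)]
        have := htail (m+1) (by omega) (by omega)
        unfold GoodAt at this
        rw [show m+1+1 = m+2 by omega] at this
        exact this
    · by_cases hone : i = 1
      · subst hone
        rw [if_pos rfl, ok_drop_iff] at hok
        refine ⟨0, by omega, ?_⟩
        rw [ok_remove_iff r 0 (by omega)]
        intro m hm
        rw [if_neg (by omega), if_neg (by omega)]
        have := hok (m+1) (by omega) (by omega)
        unfold GoodAt at this
        rw [show m+1+1 = m+2 by omega] at this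
        exact this
      · rw [if_neg hone, ok_cons_drop_iff] at hok
        obtain ⟨hjunc, htail⟩ := hok
        refine ⟨i-1, by omega, ?_⟩
        rw [ok_remove_iff r (i-1) (by omega)]
        intro m hm
        by_cases hmi : m + 1 < i - 1
        · rw [if_pos (by omega), if_pos (by omega)]
          exact hpre m (by omega)
        by_cases hmi2 : m + 1 = i - 1
        · rw [if_neg (by omega), if_pos (by omega)]
          have := hjunc (by omega)
          rw [show i - 2 = m by omega, show i = m + 2 by omega] at this
          exact this
        · rw [if_neg (by omega), if_neg (by omega)]
          have := htail (m+1) (by omega) (by omega)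
          unfold GoodAt at this
          rw [show m+1+1 = m+2 by omega] at this
          exact this

lemma loopA_true (r : List Int) (i : Nat) (h1 : 1 ≤ i)
    (hpre : ∀ m, m + 1 < i → GoodAt r m) :
    isAscLoopA r true i = is_safe_asc_alt r true := by
  rw [isAscLoopA]
  by_cases h : i < r.length
  · rw [dif_pos h]
    by_cases hg : 1 ≤ r[i] - r[i-1]'(by omega) ∧ r[i] - r[i-1]'(by omega) ≤ 3
    · rw [if_pos hg]
      apply loopA_true r (i+1) (by omega)
      intro m hm
      by_cases hmi : m + 1 < i
      · exact hpre m hmi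
      · have hme : m = i - 1 := by omega
        subst hme
        unfold GoodAt
        rw [show i-1+1 = i by omega]
        rw [getElem_eq_getD r i h, getElem_eq_getD r (i-1) (by omega)] at hg
        exact hg
    · rw [if_neg hg, if_pos rfl]
      have hbad : ¬ GoodAt r (i-1) := by
        unfold GoodAt
        rw [show i-1+1 = i by omega]
        rw [getElem_eq_getD r i h, getElem_eq_getD r (i-1) (by omega)] at hg
        exact hg
      have hokr : okAlt r = false := by
        cases hok : okAlt r with
        | false => rfl
        | true =>
          exact absurd ((ok_iff r).mp hok (i-1) (by omega)) hbad
      rw [loopA_false _ 1 le_rfl, loopA_false _ 1 le_rfl]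
      simp only [Nat.sub_self, List.drop_zero]
      rw [cand1_eq r i h1 h, getElem_eq_getD r (i-1) (by omega)]
      rw [is_safe_asc_alt, hokr]
      simp only [Bool.false_eq_true, if_false, Bool.not_true]
      by_cases hone : i = 1
      · subst hone
        rw [cand2_eq_one r]
        have := core r 1 le_rfl h hpre hbad
        rw [if_pos rfl] at this
        exact this.symm
      · rw [cand2_eq r i (by omega) h, getElem_eq_getD r (i-2) (by omega)]
        have := core r i h1 h hpre hbad
        rw [if_neg hone] at this
        exact this.symm
  · rw [dif_neg h]
    have hok : okAlt r = true := (ok_iff r).mpr (fun m hm => hpre m (by omega))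
    rw [is_safe_asc_alt, hok]
    simp
termination_by r.length - i
decreasing_by omega

-- ===== VERDICT (by name: the statement is the Claim_ definition above) =====
theorem is_safe_asc_spec : Claim_equal_is_safe_asc := by
  intro report tolerate _
  unfold Spec_is_safe_asc
  cases tolerate with
  | false =>
      show isAscLoopA report false 1 = _
      rw [loopA_false report 1 le_rfl]
      simp [is_safe_asc_alt]
  | true =>
      exact loopA_true report 1 le_rfl (by omega)
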